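-- pv_equiv track=rewrite | github.com/therealestkevin/Query-Driven-Data-Partitioning | MainWork/rowwise.py | calcError
-- ===== SOURCE A (Python) =====
-- def calcError(arr):
--     error = 0
--     for row in arr:
--         endPoint = len(arr[0]) - 1
--         startPoint = 0
--         endFlag = False
--         startFlag = False
--         valid = True
--         # Finding Last 1
--         while not endFlag:
--             if row[endPoint] == 1:
--                 endFlag = True
--             elif endPoint == 0:
--                 endFlag = True
--                 valid = False
--             else:
--                 endPoint -= 1
--         # Find First 1
--         while not startFlag:
--
--             if row[startPoint] == 1:
--                 startFlag = True
--             elif startPoint == len(arr[0]) - 1: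
--                 startFlag = True
--                 valid = False
--             else:
--                 startPoint += 1
--         # If 1 was not found in the whole row
--         # Simply don't do anything because error is 0 on the row
--         if valid:
--             for point in range(startPoint, endPoint + 1):
--                 if row[point] == 0:
--                     error += 1
--     return error
-- ===== SOURCE B (Python) =====
-- def calcError(arr):
--     error = 0
--     for row in arr:
--         seen_one = False
--         pending = 0
--         for j in range(len(arr[0])):
--             v = row[j]
--             if v == 1:
--                 if seen_one:
--                     error += pending
--                 seen_one = True
--                 pending = 0
--             elif v == 0 and seen_one:
--                 pending += 1
--     return error
-- ===== Notes on version B (the rewrite author's own statement) =====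
-- stated objective: simpler
-- what changed: A finds the last 1 by a backward while-scan and the first 1 by a forward while-scan and then makes a third counting pass over the window between them; B makes one forward pass per row with a seen-one flag and a pending zero-counter that is flushed into the error at each subsequent 1 (trailing zeros are discarded). (one pass instead of three gives a measured constant-factor speedup)
import Mathlib
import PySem

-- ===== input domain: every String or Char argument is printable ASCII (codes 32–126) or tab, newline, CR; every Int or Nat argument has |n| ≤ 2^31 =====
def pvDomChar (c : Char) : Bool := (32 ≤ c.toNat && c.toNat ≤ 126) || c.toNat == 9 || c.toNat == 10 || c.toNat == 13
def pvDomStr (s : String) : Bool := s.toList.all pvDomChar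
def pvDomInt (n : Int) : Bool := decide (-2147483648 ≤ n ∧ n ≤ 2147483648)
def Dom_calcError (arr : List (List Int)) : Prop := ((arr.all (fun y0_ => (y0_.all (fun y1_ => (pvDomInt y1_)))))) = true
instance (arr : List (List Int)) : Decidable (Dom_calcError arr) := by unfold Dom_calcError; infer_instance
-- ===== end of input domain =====

-- B replaces A's three passes per row (backward scan for the last 1, forward scan for the
-- first 1, then a counting pass over the window) by a single forward pass with a
-- seen-one flag and a pending zero-counter flushed at each later 1; equal return values.

-- ===== PORT A =====
-- `while not endFlag` backward scan; fuel only makes the recursion structural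
-- (row.length + 2 steps always suffice before `pyGet?` yields `none` = IndexError).
def pvFindEnd (row : List Int) : Int → Nat → Option (Int × Bool)
  | _, 0 => none
  | e, fuel+1 =>
    match PySem.List.pyGet? row e with
    | none => none
    | some v =>
      if v = 1 then some (e, true)
      else if e = 0 then some (e, false)
      else pvFindEnd row (e-1) fuel

-- `while not startFlag` forward scan (stops at index nm1 = len(arr[0]) - 1).
def pvFindStart (row : List Int) (nm1 : Int) : Int → Nat → Option (Int × Bool)
  | _, 0 => none
  | s, fuel+1 =>
    match PySem.List.pyGet? row s with
    | none => none
    | some v =>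
      if v = 1 then some (s, true)
      else if s = nm1 then some (s, false)
      else pvFindStart row nm1 (s+1) fuel

def calcError (arr : List (List Int)) : Int :=
  arr.foldl (fun error row =>
    let nm1 : Int := (((PySem.List.pyGet? arr 0).getD []).length : Int) - 1
    match pvFindEnd row nm1 (row.length + 2) with
    | none => error                                   -- IndexError: outside Pre_
    | some (endP, validE) =>
      match pvFindStart row nm1 0 (row.length + 2) with
      | none => error                                 -- IndexError: outside Pre_
      | some (startP, validS) =>
        if validE && validS then
          (PySem.List.pyRange startP (endP + 1) 1).foldl
            (fun err p => if PySem.List.pyGet? row p = some 0 then err + 1 else err) error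
        else error) 0

-- ===== PORT B =====
def calcError_alt (arr : List (List Int)) : Int :=
  arr.foldl (fun (error : Int) (row : List Int) =>
    let n : Nat := ((PySem.List.pyGet? arr 0).getD []).length
    ((PySem.List.pyRange 0 (n : Int) 1).foldl
      (fun (st : Int × Bool × Int) (j : Int) =>
        match PySem.List.pyGet? row j with
        | none => st                                  -- IndexError: outside Pre_
        | some v =>
          if v = 1 then (if st.2.1 then st.1 + st.2.2 else st.1, true, 0)
          else if v = 0 then (if st.2.1 then (st.1, st.2.1, st.2.2 + 1) else st)
          else st)
      (error, false, 0)).1) 0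

-- ===== PRECONDITION & SPEC =====
-- Exactly the inputs where Python A returns: the empty array, or a nonempty first row
-- with every row at least as long as it (otherwise some row access raises IndexError).
def Pre_calcError (arr : List (List Int)) : Prop :=
  arr = [] ∨ (arr.headI ≠ [] ∧ ∀ row ∈ arr, arr.headI.length ≤ row.length)
instance (arr : List (List Int)) : Decidable (Pre_calcError arr) := by
  unfold Pre_calcError; infer_instance
def pvWitness_calcError : List (List Int) := [[1, 0, 1], [0, 1, 0], [1, 0, 0, 1]]
def Spec_calcError (arr : List (List Int)) (out : Int) : Prop := out = calcError_alt arr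
instance (arr : List (List Int)) (out : Int) : Decidable (Spec_calcError arr out) := by
  unfold Spec_calcError; infer_instance

-- ===== CLAIM (what is proved, stated in full; the proofs are below) =====
def Claim_equal_calcError : Prop :=
  ∀ (arr : List (List Int)), Dom_calcError arr → Pre_calcError arr →
    Spec_calcError arr (calcError arr)
-- ===== LEMMAS AND PROOFS =====

-- index of the first 1 in a list
def pvFst : List Int → Option Nat
  | [] => none
  | v :: m => if v = 1 then some 0 else (pvFst m).map (· + 1)

-- index of the last 1 in a list
def pvLst : List Int → Option Nat
  | [] => none
  | v :: m =>
    match pvLst m with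
    | some k => some (k + 1)
    | none => if v = 1 then some 0 else none

-- zeros of m up to (strictly before) the last 1, plus pending p flushed at each 1
def pvH : List Int → Nat → Nat
  | [], _ => 0
  | v :: m, p => if v = 1 then pvH m 0 + p else if v = 0 then pvH m (p + 1) else pvH m p

-- zeros strictly between the first and last 1 of l (0 if l has no 1)
def pvG : List Int → Nat
  | [] => 0
  | v :: m => if v = 1 then pvH m 0 else pvG m

theorem pvFst_eq_none_iff (l : List Int) : pvFst l = none ↔ 1 ∉ l := by
  induction l with
  | nil => simp [pvFst]
  | cons v m ih => by_cases h : v = 1 <;> simp [pvFst, h, ih, eq_comm]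

theorem pvLst_eq_none_iff (l : List Int) : pvLst l = none ↔ 1 ∉ l := by
  induction l with
  | nil => simp [pvLst]
  | cons v m ih =>
    cases hm : pvLst m with
    | some k =>
      have h1 : 1 ∈ m := by
        by_contra hc
        rw [← ih] at hc; simp [hm] at hc
      simp [pvLst, hm, h1]
    | none => by_cases h : v = 1 <;> simp [pvLst, hm, h, ih.mp hm, eq_comm]

theorem pvLst_getElem? {l : List Int} {e : Nat} (h : pvLst l = some e) : l[e]? = some 1 := by
  induction l generalizing e with
  | nil => simp [pvLst] at h
  | cons v m ih =>
    cases hm : pvLst m with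
    | some k =>
      simp [pvLst, hm] at h
      subst h
      simpa using ih hm
    | none =>
      by_cases hv : v = 1
      · simp [pvLst, hm, hv] at h
        simp [← h, hv]
      · simp [pvLst, hm, hv] at h

theorem pvFst_le_pvLst {l : List Int} {s e : Nat} (hs : pvFst l = some s)
    (he : pvLst l = some e) : s ≤ e := by
  induction l generalizing s e with
  | nil => simp [pvFst] at hs
  | cons v m ih =>
    by_cases hv : v = 1
    · simp [pvFst, hv] at hs
      omega
    · simp [pvFst, hv] at hs
      obtain ⟨s', hs', rfl⟩ := hs
      cases hm : pvLst m with
      | some k =>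
        simp [pvLst, hm] at he
        have := ih hs' hm
        omega
      | none =>
        have : (1:Int) ∉ m := (pvLst_eq_none_iff m).mp hm
        have : pvFst m = none := (pvFst_eq_none_iff m).mpr this
        simp [this] at hs'

theorem pvLst_append_singleton (m : List Int) (v : Int) :
    pvLst (m ++ [v]) = if v = 1 then some m.length else pvLst m := by
  induction m with
  | nil => by_cases h : v = 1 <;> simp [pvLst, h]
  | cons w m ih =>
    by_cases h : v = 1
    · subst h; simp [pvLst, ih]
    · simp [pvLst, ih, h]

theorem pvH_no_one {m : List Int} (h : 1 ∉ m) (p : Nat) : pvH m p = 0 := by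
  induction m generalizing p with
  | nil => rfl
  | cons v m ih =>
    simp only [List.mem_cons, not_or] at h
    simp [pvH, Ne.symm h.1, ih h.2]

theorem pvG_no_one {l : List Int} (h : 1 ∉ l) : pvG l = 0 := by
  induction l with
  | nil => rfl
  | cons v m ih =>
    simp only [List.mem_cons, not_or] at h
    simp [pvG, Ne.symm h.1, ih h.2]

theorem pvH_spec {m : List Int} {e : Nat} (h : pvLst m = some e) (p : Nat) :
    pvH m p = p + (m.take e).countP (fun v => v = 0) := by
  induction m generalizing e p with
  | nil => simp [pvLst] at h
  | cons v m ih =>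
    by_cases hv : v = 1
    · subst hv
      cases hm : pvLst m with
      | some k =>
        simp [pvLst, hm] at h
        subst h
        simp [pvH, ih hm 0]
        omega
      | none =>
        simp [pvLst, hm] at h
        subst h
        simp [pvH, pvH_no_one ((pvLst_eq_none_iff m).mp hm)]
    · cases hm : pvLst m with
      | none => simp [pvLst, hm, hv] at h
      | some k =>
        simp [pvLst, hm] at h
        subst h
        by_cases h0 : v = 0
        · subst h0
          simp [pvH, ih hm (p + 1)]
          omega
        · simp [pvH, hv, h0, ih hm p]

theorem pvCORE {l : List Int} {s e : Nat} (hs : pvFst l = some s) (he : pvLst l = some e) :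
    ((l.drop s).take (e + 1 - s)).countP (fun v => v = 0) = pvG l := by
  induction l generalizing s e with
  | nil => simp [pvFst] at hs
  | cons v m ih =>
    by_cases hv : v = 1
    · subst hv
      simp [pvFst] at hs
      subst hs
      simp only [pvG, List.drop_zero, Nat.sub_zero]
      cases hm : pvLst m with
      | some k =>
        simp [pvLst, hm] at he
        subst he
        have hgk : m[k]? = some 1 := pvLst_getElem? hm
        rw [List.take_succ_cons, List.take_add_one, hgk]
        simp [List.countP_append, pvH_spec hm 0]
      | none =>
        simp [pvLst, hm] at he
        subst he
        simp [pvH_no_one ((pvLst_eq_none_iff m).mp hm)]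
    · simp [pvFst, hv] at hs
      obtain ⟨s', hs', rfl⟩ := hs
      cases hm : pvLst m with
      | none =>
        simp [pvLst, hm, hv] at he
      | some k =>
        simp [pvLst, hm] at he
        subst he
        have : k + 1 + 1 - (s' + 1) = k + 1 - s' := by omega
        simp only [pvG, if_neg hv, List.drop_succ_cons, this]
        exact ih hs' hm

-- generic bridge: an index loop over range(a, b) reading row[j] is a fold over the sublist
theorem pvFoldIdx {σ : Type} (row : List Int) (a b : Nat) (hb : b ≤ row.length)
    (f : σ → Int → σ) (init : σ) :
    (PySem.List.pyRange (a : Int) (b : Int) 1).foldl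
        (fun st j => f st (PySem.List.pyGetD row j 0)) init
      = ((row.drop a).take (b - a)).foldl f init := by
  have hcong : ∀ (st : σ), ∀ j ∈ PySem.List.pyRange (a : Int) (b : Int) 1,
      f st (PySem.List.pyGetD row j 0) = f st (PySem.List.pyGetD (row.take b) j 0) := by
    intro st j hj
    rw [PySem.List.mem_pyRange_one] at hj
    have h0 : (0:Int) ≤ j := le_trans (by exact_mod_cast Nat.zero_le a) hj.1
    have hjb : j < ((row.take b).length : Int) := by
      rw [List.length_take, Nat.min_eq_left hb]; exact hj.2
    have hjr : j < (row.length : Int) := lt_of_lt_of_le hjb (by simp [List.length_take])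
    rw [PySem.List.pyGetD_eq_getElem row 0 h0 hjr,
        PySem.List.pyGetD_eq_getElem (row.take b) 0 h0 hjb, List.getElem_take]
  rw [PySem.List.foldl_congr_mem _ _ _ _ hcong]
  have hlen : (b : Int) = PySem.List.len (row.take b) := by
    simp [PySem.List.len_eq, List.length_take, Nat.min_eq_left hb]
  rw [hlen, PySem.List.foldl_pyRange_pyGetD (row.take b) 0 f init (by exact_mod_cast Nat.zero_le a)]
  rw [Int.toNat_natCast, List.drop_take]

-- the backward scan finds the last 1 at or below e (valid=false if none and it hit 0)
theorem pvScanE (row : List Int) (n : Nat) (hn : n ≤ row.length) :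
    ∀ (fuel e : Nat), e < n → e + 1 ≤ fuel →
      pvFindEnd row (e : Int) fuel =
        match pvLst (row.take (e + 1)) with
        | some k => some ((k : Int), true)
        | none => some (0, false) := by
  intro fuel
  induction fuel with
  | zero => intro e _ h; omega
  | succ f ihf =>
    intro e he hf
    have hel : (e : Int) < (row.length : Int) := by exact_mod_cast lt_of_lt_of_le he hn
    have hget : PySem.List.pyGet? row (e : Int) = some row[e] := by
      rw [PySem.List.pyGet?_eq_some_getElem row (by exact_mod_cast Nat.zero_le e) hel]
      simp
    have htk : row.take (e + 1) = row.take e ++ [row[e]] := by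
      rw [List.take_add_one, List.getElem?_eq_getElem (lt_of_lt_of_le he hn)]
      rfl
    by_cases h1 : row[e] = (1:Int)
    · have hL : pvLst (row.take (e + 1)) = some e := by
        rw [htk, pvLst_append_singleton, if_pos h1]
        congr 1
        simp [List.length_take, Nat.min_eq_left (le_trans he.le hn)]
      simp [pvFindEnd, hget, h1, hL]
    · rcases Nat.eq_zero_or_pos e with rfl | hpos
      · have hget0 : PySem.List.pyGet? row 0 = some row[0] := by simpa using hget
        have hL : pvLst (row.take (0 + 1)) = none := by
          rw [htk]
          simp [pvLst, h1]
        simp [pvFindEnd, hget0, h1, hL]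
      · have hne : ((e : Nat) : Int) ≠ 0 := by exact_mod_cast Nat.pos_iff_ne_zero.mp hpos
        have hcast : ((e : Nat) : Int) - 1 = (((e - 1 : Nat)) : Int) := by omega
        have hL : pvLst (row.take (e + 1)) = pvLst (row.take (e - 1 + 1)) := by
          rw [htk, pvLst_append_singleton, if_neg h1, show e - 1 + 1 = e by omega]
        rw [hL, ← ihf (e - 1) (by omega) (by omega), ← hcast]
        simp only [pvFindEnd, hget]
        rw [if_neg h1, if_neg hne]

-- the forward scan finds the first 1 at or above s (valid=false if none up to n-1)
theorem pvScanS (row : List Int) (n : Nat) (hn : n ≤ row.length) (hn1 : 1 ≤ n) :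
    ∀ (fuel s : Nat), s < n → n - s ≤ fuel →
      pvFindStart row ((n : Int) - 1) (s : Int) fuel =
        match pvFst ((row.take n).drop s) with
        | some k => some (((s + k : Nat) : Int), true)
        | none => some ((n : Int) - 1, false) := by
  intro fuel
  induction fuel with
  | zero => intro s hs h; omega
  | succ f ihf =>
    intro s hs hf
    have hsl : (s : Int) < (row.length : Int) := by exact_mod_cast lt_of_lt_of_le hs hn
    have hget : PySem.List.pyGet? row (s : Int) = some row[s] := by
      rw [PySem.List.pyGet?_eq_some_getElem row (by exact_mod_cast Nat.zero_le s) hsl]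
      simp
    have hslen : s < (row.take n).length := by
      rw [List.length_take, Nat.min_eq_left hn]; exact hs
    have hgel : (row.take n)[s] = row[s] := List.getElem_take
    have hdrop : (row.take n).drop s = row[s] :: (row.take n).drop (s + 1) := by
      rw [← hgel]
      exact (List.getElem_cons_drop hslen).symm
    by_cases h1 : row[s] = (1:Int)
    · have hF : pvFst ((row.take n).drop s) = some 0 := by
        rw [hdrop]
        simp [pvFst, h1]
      simp [pvFindStart, hget, h1, hF]
    · rcases Nat.lt_or_ge s (n - 1) with hlt | hge
      · have hne : ((s : Nat) : Int) ≠ (n : Int) - 1 := by omega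
        have hcast : ((s : Nat) : Int) + 1 = (((s + 1 : Nat)) : Int) := by omega
        have hstep : pvFst ((row.take n).drop s) =
            (pvFst ((row.take n).drop (s + 1))).map (· + 1) := by
          rw [hdrop]
          simp [pvFst, h1]
        rw [hstep]
        have hIH := ihf (s + 1) (by omega) (by omega)
        cases hfst : pvFst ((row.take n).drop (s + 1)) with
        | none =>
          simp only [hfst] at hIH
          simp only [Option.map_none]
          rw [← hIH, ← hcast]
          simp only [pvFindStart, hget]
          rw [if_neg h1, if_neg hne]
        | some k =>
          simp only [hfst] at hIH
          simp only [Option.map_some]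
          have hkk : ((s + (k + 1) : Nat) : Int) = ((s + 1 + k : Nat) : Int) := by omega
          rw [hkk, ← hIH, ← hcast]
          simp only [pvFindStart, hget]
          rw [if_neg h1, if_neg hne]
      · have hseq : s = n - 1 := by omega
        have heq : ((s : Nat) : Int) = (n : Int) - 1 := by omega
        have hnil : (row.take n).drop (s + 1) = [] := by
          apply List.drop_eq_nil_of_le
          rw [List.length_take, Nat.min_eq_left hn]; omega
        have hF : pvFst ((row.take n).drop s) = none := by
          rw [hdrop, hnil]
          simp [pvFst, h1]
        have hget' : PySem.List.pyGet? row ((n : Int) - 1) = some row[s] := by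
          rw [← heq]; exact hget
        simp [pvFindStart, hget', h1, hF, heq]

-- B's per-row loop, list form
def pvStep (st : Int × Bool × Int) (v : Int) : Int × Bool × Int :=
  if v = 1 then (if st.2.1 then st.1 + st.2.2 else st.1, true, 0)
  else if v = 0 then (if st.2.1 then (st.1, st.2.1, st.2.2 + 1) else st)
  else st

theorem pvBloop (l : List Int) (err : Int) (seen : Bool) (p : Nat) :
    (l.foldl pvStep (err, seen, (p : Int))).1 =
      err + (if seen then (pvH l p : Int) else (pvG l : Int)) := by
  induction l generalizing err seen p with
  | nil => cases seen <;> simp [pvH, pvG]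
  | cons v m ih =>
    by_cases h1 : v = 1
    · subst h1
      cases seen
      · simp only [List.foldl_cons, pvStep]
        simpa [pvH, pvG] using ih err true 0
      · simp only [List.foldl_cons, pvStep]
        have := ih (err + (p : Int)) true 0
        simp only [Nat.cast_zero] at this ⊢
        simp [this, pvH]
        ring
    · by_cases h0 : v = 0
      · subst h0
        cases seen
        · simp only [List.foldl_cons, pvStep, h1, ite_false]
          simpa [pvG, h1] using ih err false p
        · simp only [List.foldl_cons, pvStep, h1, ite_false]
          have hc : ((p : Int) + 1) = ((p + 1 : Nat) : Int) := by push_cast; ring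
          simp only [ite_true, hc]
          simpa [pvH, h1] using ih err true (p + 1)
      · cases seen <;>
          simp only [List.foldl_cons, pvStep, h1, h0, ite_false] <;>
          [simpa [pvG, h1, h0] using ih err false p; simpa [pvH, h1, h0] using ih err true p]

theorem pvRowB (row : List Int) (n : Nat) (hn : n ≤ row.length) (error : Int) :
    ((PySem.List.pyRange 0 (n : Int) 1).foldl
      (fun (st : Int × Bool × Int) j =>
        match PySem.List.pyGet? row j with
        | none => st
        | some v =>
          if v = 1 then (if st.2.1 then st.1 + st.2.2 else st.1, true, 0)
          else if v = 0 then (if st.2.1 then (st.1, st.2.1, st.2.2 + 1) else st)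
          else st)
      (error, false, 0)).1 = error + (pvG (row.take n) : Int) := by
  have hcong : ∀ (st : Int × Bool × Int), ∀ j ∈ PySem.List.pyRange 0 (n : Int) 1,
      (match PySem.List.pyGet? row j with
        | none => st
        | some v =>
          if v = 1 then (if st.2.1 then st.1 + st.2.2 else st.1, true, 0)
          else if v = 0 then (if st.2.1 then (st.1, st.2.1, st.2.2 + 1) else st)
          else st)
        = pvStep st (PySem.List.pyGetD row j 0) := by
    intro st j hj
    rw [PySem.List.mem_pyRange_one] at hj
    have hjr : j < (row.length : Int) := lt_of_lt_of_le hj.2 (by exact_mod_cast hn)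
    rw [PySem.List.pyGet?_eq_some_getElem row hj.1 hjr,
        PySem.List.pyGetD_eq_getElem row 0 hj.1 hjr]
    rfl
  rw [PySem.List.foldl_congr_mem _ _ _ _ hcong]
  have hidx := pvFoldIdx row 0 n hn pvStep (error, false, 0)
  simp only [Nat.cast_zero, List.drop_zero, Nat.sub_zero] at hidx
  rw [hidx]
  have hloop := pvBloop (row.take n) error false 0
  simp only [Nat.cast_zero, Bool.false_eq_true, ite_false] at hloop
  exact hloop

theorem pvRowA (row : List Int) (n : Nat) (hn1 : 1 ≤ n) (hn : n ≤ row.length) (error : Int) :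
    (match pvFindEnd row ((n : Int) - 1) (row.length + 2) with
    | none => error
    | some (endP, validE) =>
      match pvFindStart row ((n : Int) - 1) 0 (row.length + 2) with
      | none => error
      | some (startP, validS) =>
        if validE && validS then
          (PySem.List.pyRange startP (endP + 1) 1).foldl
            (fun err p => if PySem.List.pyGet? row p = some 0 then err + 1 else err) error
        else error) = error + (pvG (row.take n) : Int) := by
  have hcast1 : ((n : Int) - 1) = (((n - 1 : Nat)) : Int) := by omega
  have hS := pvScanS row n hn hn1 (row.length + 2) 0 (by omega) (by omega)
  simp only [Nat.cast_zero, hcast1, List.drop_zero, Nat.zero_add] at hS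
  rw [hcast1, pvScanE row n hn (row.length + 2) (n - 1) (by omega) (by omega),
    show n - 1 + 1 = n from by omega, hS]
  cases hL : pvLst (row.take n) with
  | none =>
    have h1 : (1 : Int) ∉ row.take n := (pvLst_eq_none_iff _).mp hL
    have hF : pvFst (row.take n) = none := (pvFst_eq_none_iff _).mpr h1
    simp [hF, pvG_no_one h1]
  | some e =>
    cases hF : pvFst (row.take n) with
    | none =>
      exfalso
      have h1 : (1 : Int) ∉ row.take n := (pvFst_eq_none_iff _).mp hF
      rw [(pvLst_eq_none_iff _).mpr h1] at hL
      cases hL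
    | some s0 =>
      have hge : (row.take n)[e]? = some 1 := pvLst_getElem? hL
      have he_lt : e < n := by
        have := (List.getElem?_eq_some_iff.mp hge).1
        simpa [List.length_take, Nat.min_eq_left hn] using this
      have hs_le : s0 ≤ e := pvFst_le_pvLst hF hL
      simp only [Bool.and_self, ite_true]
      have hcast2 : ((e : Nat) : Int) + 1 = (((e + 1 : Nat)) : Int) := by omega
      rw [hcast2]
      have hcong : ∀ (err : Int), ∀ p ∈ PySem.List.pyRange (s0 : Int) ((e + 1 : Nat) : Int) 1,
          (if PySem.List.pyGet? row p = some 0 then err + 1 else err)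
            = (if PySem.List.pyGetD row p 0 = 0 then err + 1 else err) := by
        intro err p hp
        rw [PySem.List.mem_pyRange_one] at hp
        have h0 : (0 : Int) ≤ p := le_trans (by exact_mod_cast Nat.zero_le s0) hp.1
        have hpr : p < (row.length : Int) := by
          have : ((e + 1 : Nat) : Int) ≤ (row.length : Int) := by
            exact_mod_cast le_trans (by omega : e + 1 ≤ n) hn
          omega
        rw [PySem.List.pyGet?_eq_some_getElem row h0 hpr,
            PySem.List.pyGetD_eq_getElem row 0 h0 hpr]
        simp
      rw [PySem.List.foldl_congr_mem _ _ _ _ hcong,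
        pvFoldIdx row s0 (e + 1) (le_trans (by omega) hn)
          (fun err v => if v = 0 then err + 1 else err) error,
        PySem.List.foldl_ite_add_one (fun v => v = 0)]
      have hwin : (row.drop s0).take (e + 1 - s0) = ((row.take n).drop s0).take (e + 1 - s0) := by
        rw [List.drop_take, List.take_take, Nat.min_eq_left (by omega)]
      rw [hwin, pvCORE hF hL]

-- ===== VERDICT (by name: the statement is the Claim_ definition above) =====
theorem calcError_spec : Claim_equal_calcError := by
  intro arr _ hpre
  unfold Spec_calcError
  rcases hpre with rfl | ⟨hne, hall⟩
  · rfl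
  · cases arr with
    | nil => exact absurd rfl hne
    | cons r0 rest =>
      simp only [List.headI] at hne hall
      have hn1 : 1 ≤ r0.length := by
        cases r0 with
        | nil => exact absurd rfl hne
        | cons a t => simp
      unfold calcError calcError_alt
      simp only [PySem.List.pyGet?_zero_cons, Option.getD_some]
      refine (PySem.List.foldl_congr_mem _ _
          (fun (error : Int) (row : List Int) => error + (pvG (row.take r0.length) : Int))
          _ ?_).trans
        (PySem.List.foldl_congr_mem _ _
          (fun (error : Int) (row : List Int) => error + (pvG (row.take r0.length) : Int))
          _ ?_).symm
      · intro acc row hrow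
        exact pvRowA row r0.length hn1 (hall row hrow) acc
      · intro acc row hrow
        exact pvRowB row r0.length (hall row hrow) acc
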